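-- pv_equiv track=rewrite | github.com/chloebaro/dna_program | dna.py | match_enzymes
-- ===== SOURCE A (Python) =====
-- def restriction_sites(strand, rcgn_sequence):
--     """ (str, str) -> list of int
--
--     Return a list of all the indices where rcgn_sequence starts in strand.
--
--     Examples:
--     >>> restriction_sites("GAATTCCCAA", "GAATTC")
--     [0]
--     >>> restriction_sites("AGAATTCAAAGAATTCTTTGAATTC", "GAATTC")
--     [1, 10, 19]
--     >>> restriction_sites("GAATTCCC", "AACC")
--     []
--
--     """
--
--     new_strand = strand
--     sequence_length = len(rcgn_sequence)
--     index_list = []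
--     chars_passed = 0
--
--     """ The following code will find all the indices at which the rcgn_sequence
--     occurs in the strand. We will change new_strand each time we find the
--     rcgn_sequence by removing everything before and including rcgn_sequence
--     from new_strand (which is initially equal to strand). This process makes it
--     easier for us to find subsequent instances of rcgn_sequences in the strand.
--     """
--     while(rcgn_sequence in new_strand):
--         index = new_strand.find(rcgn_sequence) + chars_passed
--         index_list.append(index)
--         chars_passed = chars_passed + new_strand.find(rcgn_sequence) +\
--             sequence_length
--         new_strand = new_strand[new_strand.find(rcgn_sequence) +\
--                                 sequence_length:]
--
--     return index_list
--
-- def match_enzymes(strand, r_enzyme_names, recognition_sequences):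
--     """ (str, list of str, list of str) -> list of two item [str, list of int]
--     lists
--
--     Precondition: r_enzyme_names and recognition_sequences have the same length.
--
--     Return a two item list that consists of each restriction enzyme name and
--     the indices at which the restriction enzyme's corresponding recognition
--     sequence occurs.
--
--     Examples:
--     >>> strand = "AGAATTCGGATCCGAATTC"
--     >>> r_enzyme_list = ["EcoRI", "BamHI"]
--     >>> recog_sequences = ["GAATTC", "GGATCC"]
--     >>> match_enzymes(strand, r_enzyme_list, recog_sequences)
--     [["EcoRI", [1, 13]], ["BamHI", [7]]]
--     >>> r_enzyme_list.append("HindIII")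
--     >>> recog_sequences.append("AAGCTT")
--     >>> match_enzymes(strand, r_enzyme_list, recog_sequences)
--     [["EcoRI", [1, 13]], ["BamHI", [7]], ["HindIII", []]]
--
--     """
--
--
--     enzyme_and_site_list = []
--     for i in range(len(r_enzyme_names)):
--         rstrcn_sites = restriction_sites(strand, recognition_sequences[i])
--         enzyme_and_site = []
--         enzyme_and_site.append(r_enzyme_names[i])
--         enzyme_and_site.append(rstrcn_sites)
--         enzyme_and_site_list.append(enzyme_and_site)
--
--     return enzyme_and_site_list
-- ===== SOURCE B (Python) =====
-- def match_enzymes(strand, r_enzyme_names, recognition_sequences):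
--     result = []
--     for name, seq in zip(r_enzyme_names, recognition_sequences):
--         candidates = [i for i in range(len(strand)) if strand.startswith(seq, i)]
--         sites = []
--         next_allowed = 0
--         for c in candidates:
--             if c >= next_allowed:
--                 sites.append(c)
--                 next_allowed = c + len(seq)
--         result.append([name, sites])
--     return result
-- ===== Notes on version B (the rewrite author's own statement) =====
-- stated objective: alternative
-- what changed: A repeatedly searches with 'in'/find and trims the strand after each hit, rebasing indices with a chars_passed counter; B first builds the full table of (possibly overlapping) match positions with startswith at every index, then selects non-overlapping sites in a second greedy pass with a next_allowed cursor.
-- outside the precondition, e.g. on match_enzymes('A', ['E', 'B'], ['A']): A raises IndexError, B returns [('E', [0])]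
import Mathlib
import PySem

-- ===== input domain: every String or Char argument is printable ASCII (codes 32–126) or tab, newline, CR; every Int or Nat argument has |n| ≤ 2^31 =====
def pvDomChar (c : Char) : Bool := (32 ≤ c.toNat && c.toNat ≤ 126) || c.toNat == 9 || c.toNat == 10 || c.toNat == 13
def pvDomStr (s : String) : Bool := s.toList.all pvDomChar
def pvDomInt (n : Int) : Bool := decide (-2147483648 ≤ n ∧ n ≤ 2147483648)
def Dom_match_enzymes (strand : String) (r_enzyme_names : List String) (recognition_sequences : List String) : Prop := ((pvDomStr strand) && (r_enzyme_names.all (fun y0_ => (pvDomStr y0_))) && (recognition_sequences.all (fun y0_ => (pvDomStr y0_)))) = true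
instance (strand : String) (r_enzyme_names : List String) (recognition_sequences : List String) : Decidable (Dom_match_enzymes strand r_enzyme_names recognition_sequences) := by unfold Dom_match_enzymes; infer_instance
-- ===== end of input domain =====

-- B replaces A's interleaved find-and-trim loop by a table of all match positions plus a greedy
-- non-overlap filter pass (objective: alternative decomposition, same cost).

-- ===== PORT A =====
-- the while loop of restriction_sites, with fuel; under Pre_ (nonempty sequence) strand-length + 1
-- iterations always suffice, since every pass removes at least sequence-length ≥ 1 characters
def rsLoop (seq : List Char) : Nat → List Char → Int → List Int → List Int
  | 0, _, _, index_list => index_list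
  | fuel+1, new_strand, chars_passed, index_list =>
    if PySem.Chars.isIn seq new_strand then
      let f := PySem.Chars.find new_strand seq
      rsLoop seq fuel (PySem.List.slice new_strand (some (f + (seq.length : Int))) none)
        (chars_passed + f + (seq.length : Int)) (index_list ++ [f + chars_passed])
    else index_list

def restriction_sites (strand : String) (rcgn_sequence : String) : List Int :=
  rsLoop rcgn_sequence.toList (strand.toList.length + 1) strand.toList 0 []

def match_enzymes (strand : String) (r_enzyme_names : List String) (recognition_sequences : List String) : List (String × List Int) :=
  (PySem.List.pyRange 0 (r_enzyme_names.length : Int) 1).foldl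
    (fun enzyme_and_site_list i =>
      let rstrcn_sites := restriction_sites strand (PySem.List.pyGetD recognition_sequences i "")
      enzyme_and_site_list ++ [(PySem.List.pyGetD r_enzyme_names i "", rstrcn_sites)])
    []

-- ===== PORT B =====
-- [i for i in range(len(strand)) if strand.startswith(seq, i)]
-- strand.startswith(seq, i) with 0 ≤ i < len(strand) is exactly: seq is a prefix of strand[i:]  (exact here)
def candSites (strand seq : List Char) : List Nat :=
  (List.range strand.length).filter (fun i => PySem.Chars.startswith (strand.drop i) seq)

-- the second pass: fold over the candidates with state (sites, next_allowed)
def greedyPick (L : Nat) (cands : List Nat) : List Int × Nat :=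
  cands.foldl (fun st c => if st.2 ≤ c then (st.1 ++ [(c : Int)], c + L) else st) ([], 0)

def match_enzymes_alt (strand : String) (r_enzyme_names : List String) (recognition_sequences : List String) : List (String × List Int) :=
  (r_enzyme_names.zip recognition_sequences).map
    (fun p => (p.1, (greedyPick p.2.toList.length (candSites strand.toList p.2.toList)).1))

-- ===== PRECONDITION & SPEC =====
-- Pre_ excludes exactly the inputs on which Python A does not return: recognition_sequences shorter
-- than r_enzyme_names (IndexError at recognition_sequences[i]) and an empty recognition sequence among
-- those used (A's while loop never advances: it hangs).
def Pre_match_enzymes (strand : String) (r_enzyme_names : List String) (recognition_sequences : List String) : Prop :=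
  r_enzyme_names.length ≤ recognition_sequences.length ∧
  ∀ s ∈ recognition_sequences.take r_enzyme_names.length, s ≠ ""
instance (strand : String) (r_enzyme_names : List String) (recognition_sequences : List String) : Decidable (Pre_match_enzymes strand r_enzyme_names recognition_sequences) := by unfold Pre_match_enzymes; infer_instance

def pvWitness_match_enzymes : String × List String × List String :=
  ("AGAATTCGGATCCGAATTC", (["EcoRI", "BamHI"], ["GAATTC", "GGATCC"]))

def Spec_match_enzymes (strand : String) (r_enzyme_names : List String) (recognition_sequences : List String) (out : List (String × List Int)) : Prop := out = match_enzymes_alt strand r_enzyme_names recognition_sequences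
instance (strand : String) (r_enzyme_names : List String) (recognition_sequences : List String) (out : List (String × List Int)) : Decidable (Spec_match_enzymes strand r_enzyme_names recognition_sequences out) := by unfold Spec_match_enzymes; infer_instance

-- ===== CLAIM (what is proved, stated in full; the proofs are below) =====
def Claim_equal_match_enzymes : Prop := ∀ (strand : String) (r_enzyme_names : List String) (recognition_sequences : List String), Dom_match_enzymes strand r_enzyme_names recognition_sequences → Pre_match_enzymes strand r_enzyme_names recognition_sequences → Spec_match_enzymes strand r_enzyme_names recognition_sequences (match_enzymes strand r_enzyme_names recognition_sequences)
-- ===== LEMMAS AND PROOFS =====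

-- greedyPick's fold as structural recursion over the candidate list
def greedyRec (L : Nat) : List Nat → Nat → List Int
  | [], _ => []
  | c :: cs, na => if na ≤ c then (c : Int) :: greedyRec L cs (c + L) else greedyRec L cs na

lemma greedyPick_foldl (L : Nat) (cands : List Nat) (acc : List Int) (na : Nat) :
    (cands.foldl (fun (st : List Int × Nat) (c : Nat) => if st.2 ≤ c then (st.1 ++ [(c : Int)], c + L) else st) (acc, na)).1
      = acc ++ greedyRec L cands na := by
  induction cands generalizing acc na with
  | nil => simp [greedyRec]
  | cons c cs ih =>
      simp only [List.foldl_cons, greedyRec]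
      by_cases h : na ≤ c
      · simp [h, ih]
      · simp [h, ih]

lemma greedyRec_dropWhile (L : Nat) (cands : List Nat) (na : Nat) :
    greedyRec L cands na = greedyRec L (cands.dropWhile (fun c => decide (c < na))) na := by
  induction cands with
  | nil => rfl
  | cons c cs ih =>
      by_cases h : c < na
      · simp [greedyRec, h, Nat.not_le.mpr h, ih]
      · simp [h]

lemma mem_candSites {s seq : List Char} {i : Nat} :
    i ∈ candSites s seq ↔ i < s.length ∧ seq <+: s.drop i := by
  simp [candSites, List.mem_filter, PySem.Chars.startswith_iff]

-- head of dropWhile (< p) on a strictly increasing list: the least element ≥ p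
lemma dropWhile_head_min (l : List Nat) (hl : l.Pairwise (· < ·)) (p c : Nat) (cs : List Nat)
    (h : l.dropWhile (fun x => decide (x < p)) = c :: cs) :
    p ≤ c ∧ c ∈ l ∧ ∀ x ∈ l, p ≤ x → c ≤ x := by
  induction l with
  | nil => simp at h
  | cons a as ih =>
      rcases List.pairwise_cons.mp hl with ⟨ha, has⟩
      by_cases hap : a < p
      · simp only [List.dropWhile_cons, decide_eq_true_eq, if_pos hap] at h
        obtain ⟨h1, h2, h3⟩ := ih has h
        exact ⟨h1, List.mem_cons_of_mem _ h2, by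
          intro x hx hpx
          rcases List.mem_cons.mp hx with rfl | hx'
          · omega
          · exact h3 x hx' hpx⟩
      · simp only [List.dropWhile_cons, decide_eq_true_eq, if_neg hap] at h
        cases h
        refine ⟨by omega, List.mem_cons_self, ?_⟩
        intro x hx _
        rcases List.mem_cons.mp hx with rfl | hx'
        · exact le_refl _
        · exact le_of_lt (ha x hx')

lemma dropWhile_shift (l : List Nat) (p q c : Nat) (cs : List Nat) (hpq : p ≤ q)
    (h : l.dropWhile (fun x => decide (x < p)) = c :: cs) (hcq : c < q) :
    l.dropWhile (fun x => decide (x < q)) = cs.dropWhile (fun x => decide (x < q)) := by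
  induction l with
  | nil => simp at h
  | cons a as ih =>
      by_cases hap : a < p
      · simp only [List.dropWhile_cons, decide_eq_true_eq, if_pos hap] at h
        simp only [List.dropWhile_cons, decide_eq_true_eq, if_pos (by omega : a < q)]
        exact ih h
      · simp only [List.dropWhile_cons, decide_eq_true_eq, if_neg hap] at h
        cases h
        simp [hcq]

lemma candSites_pairwise (s seq : List Char) : (candSites s seq).Pairwise (· < ·) :=
  (List.pairwise_lt_range).filter _

lemma infix_of_prefix_drop {seq t : List Char} {k : Nat} (h : seq <+: t.drop k) : seq <:+: t :=
  h.isInfix.trans (List.drop_suffix k t).isInfix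

lemma rsLoop_eq (seq s : List Char) (hseq : seq ≠ []) :
    ∀ fuel p acc, p ≤ s.length → s.length - p < fuel →
    rsLoop seq fuel (s.drop p) (p : Int) acc
      = acc ++ greedyRec seq.length ((candSites s seq).dropWhile (fun c => decide (c < p))) p := by
  intro fuel
  induction fuel with
  | zero => intro p acc _ h; omega
  | succ fuel ih =>
      intro p acc hp hfuel
      by_cases h : PySem.Chars.isIn seq (s.drop p) = true
      · -- there is a match in the remaining strand
        have hinf : seq <:+: s.drop p := (PySem.Chars.isIn_iff_infix _ _).mp h
        have hfnn : (0:Int) ≤ PySem.Chars.find (s.drop p) seq :=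
          (PySem.Chars.find_nonneg_iff _ _).mpr hinf
        obtain ⟨hpre, hmin⟩ := PySem.Chars.find_spec (s := s.drop p) (sub := seq) hfnn
        set fN : Nat := (PySem.Chars.find (s.drop p) seq).toNat with hfN
        have hfInt : PySem.Chars.find (s.drop p) seq = (fN : Int) := (Int.toNat_of_nonneg hfnn).symm
        set c : Nat := p + fN with hc
        have hpre' : seq <+: s.drop c := by
          have hdd : List.drop fN (List.drop p s) = List.drop c s := by
            rw [List.drop_drop]
          exact hdd ▸ hpre
        have hL : 1 ≤ seq.length := by
          cases seq with | nil => exact absurd rfl hseq | cons a as => simp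
        have hcL : c + seq.length ≤ s.length := by
          have := hpre'.length_le
          simp [List.length_drop] at this
          omega
        have hcs : c < s.length := by omega
        have hcmem : c ∈ candSites s seq := mem_candSites.mpr ⟨hcs, hpre'⟩
        -- the dropWhile head is exactly c
        obtain ⟨c₀, cs, hdw⟩ : ∃ c₀ cs, (candSites s seq).dropWhile (fun x => decide (x < p)) = c₀ :: cs := by
          rcases hdwe : (candSites s seq).dropWhile (fun x => decide (x < p)) with _ | ⟨c₀, cs⟩
          · exfalso
            have := List.dropWhile_eq_nil_iff.mp hdwe c hcmem
            simp at this
            omega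
          · exact ⟨c₀, cs, rfl⟩
        obtain ⟨hpc₀, hc₀mem, hc₀min⟩ := dropWhile_head_min _ (candSites_pairwise s seq) _ _ _ hdw
        have hc₀c : c₀ = c := by
          obtain ⟨_, hc₀pre⟩ := mem_candSites.mp hc₀mem
          have h1 : c ≤ c₀ := by
            by_contra hlt
            have : ¬ seq <+: (s.drop p).drop (c₀ - p) := hmin (c₀ - p) (by omega)
            rw [List.drop_drop, show p + (c₀ - p) = c₀ from by omega] at this
            exact this hc₀pre
          have h2 : c₀ ≤ c := hc₀min c hcmem (by omega)
          omega
        subst hc₀c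
        -- one unfolding of the loop
        simp only [rsLoop, if_pos h]
        rw [hfInt]
        have hslice : PySem.List.slice (s.drop p) (some ((fN : Int) + (seq.length : Int))) none
            = s.drop (c + seq.length) := by
          rw [PySem.List.slice_from (s.drop p) (a := (fN : Int) + (seq.length : Int)) (by positivity),
              List.drop_drop]
          congr 1
          omega
        have hcast : (p : Int) + (fN : Int) + (seq.length : Int) = ((c + seq.length : Nat) : Int) := by
          push_cast; omega
        rw [hslice, hcast]
        rw [ih (c + seq.length) (acc ++ [(fN : Int) + (p : Int)]) (by omega) (by omega)]
        rw [hdw]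
        have hle : p ≤ c := by omega
        simp only [greedyRec, if_pos hle]
        rw [dropWhile_shift (candSites s seq) p (c + seq.length) c cs (by omega) hdw (by omega),
            ← greedyRec_dropWhile]
        simp only [List.append_assoc, List.singleton_append]
        congr 2
        omega
      · -- no match: loop stops; no candidate ≥ p either
        have hnf : ¬ seq <:+: s.drop p := by
          rw [← PySem.Chars.isIn_iff_infix]
          simpa using h
        have hdw : (candSites s seq).dropWhile (fun x => decide (x < p)) = [] := by
          apply List.dropWhile_eq_nil_iff.mpr
          intro x hx
          obtain ⟨_, hxpre⟩ := mem_candSites.mp hx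
          simp only [decide_eq_true_eq]
          by_contra hge
          have hple : p ≤ x := by omega
          have : seq <+: (s.drop p).drop (x - p) := by
            rw [List.drop_drop, show p + (x - p) = x from by omega]; exact hxpre
          exact hnf (infix_of_prefix_drop this)
        simp only [rsLoop, if_neg h, hdw, greedyRec, List.append_nil]

lemma restriction_sites_eq (strand seq : String) (hseq : seq ≠ "") :
    restriction_sites strand seq
      = (greedyPick seq.toList.length (candSites strand.toList seq.toList)).1 := by
  have hseq' : seq.toList ≠ [] := by
    intro hnil
    exact hseq (String.toList_inj.mp (by simp [hnil]))
  have := rsLoop_eq seq.toList strand.toList hseq' (strand.toList.length + 1) 0 [] (Nat.zero_le _) (by omega)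
  rw [List.drop_zero] at this
  simp only [Nat.cast_zero] at this
  have hdw0 : List.dropWhile (fun c => decide ((c : Nat) < 0)) (candSites strand.toList seq.toList)
      = candSites strand.toList seq.toList := by simp
  rw [restriction_sites, this, hdw0, greedyPick, greedyPick_foldl]

-- ===== VERDICT (by name: the statement is the Claim_ definition above) =====
theorem match_enzymes_spec : Claim_equal_match_enzymes := by
  intro strand names seqs _ hpre
  obtain ⟨hlen, hne⟩ := hpre
  unfold Spec_match_enzymes match_enzymes match_enzymes_alt
  rw [PySem.List.foldl_append_singleton_eq_map, List.nil_append,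
      PySem.List.pyRange_zero_natCast, List.map_map]
  apply List.ext_getElem
  · simp only [List.length_map, List.length_range, List.length_zip]
    omega
  · intro i h1 h2
    have hiN : i < names.length := by
      simp [List.length_zip] at h2
      omega
    have hiS : i < seqs.length := by omega
    simp only [List.getElem_map, List.getElem_range, List.getElem_zip, Function.comp_apply,
      PySem.List.pyGetD_natCast]
    rw [List.getD_eq_getElem _ _ hiN, List.getD_eq_getElem _ _ hiS]
    have hne' : seqs[i] ≠ "" := by
      apply hne
      have h3 : i < (seqs.take names.length).length := by
        simp
        omega
      have h4 : seqs[i] = (seqs.take names.length)[i] := by simp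
      rw [h4]
      exact List.getElem_mem h3
    rw [restriction_sites_eq strand seqs[i] hne']
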